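-- pv_equiv track=rewrite | github.com/g214-minin/Python_practice | Task/tasks6.py | matrix_generator
-- ===== SOURCE A (Python) =====
-- def matrix_generator(num):
--
--     array = [[step * 0 for step in range(num)] for _ in range(num)]
--
--     i = 0
--     j = 1
--
--     while i < num:
--         array[i][-i-1] = 1
--         i += 1
--
--     while j < num:
--         array[j][-j] = 2
--         j += 1
--
--     return array
-- ===== SOURCE B (Python) =====
-- def matrix_generator(num):
--     return [[1 if c == num - 1 - r else (2 if r >= 1 and c == num - r else 0)
--              for c in range(num)]
--             for r in range(num)]
-- ===== Notes on version B (the rewrite author's own statement) =====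
-- stated objective: simpler
-- what changed: B builds each row directly with a per-cell conditional comprehension (1 on column num-1-r, 2 on column num-r for r>=1, else 0) instead of allocating a zero matrix and then patching it with two negative-index while loops.
import Mathlib
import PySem

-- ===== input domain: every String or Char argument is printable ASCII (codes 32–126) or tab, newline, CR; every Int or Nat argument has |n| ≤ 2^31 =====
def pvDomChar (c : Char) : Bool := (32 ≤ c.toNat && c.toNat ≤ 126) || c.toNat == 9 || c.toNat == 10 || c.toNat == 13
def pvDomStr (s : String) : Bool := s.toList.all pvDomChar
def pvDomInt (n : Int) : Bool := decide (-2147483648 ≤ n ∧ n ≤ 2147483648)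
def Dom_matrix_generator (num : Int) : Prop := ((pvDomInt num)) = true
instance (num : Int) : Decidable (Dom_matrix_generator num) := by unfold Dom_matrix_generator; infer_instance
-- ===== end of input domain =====

-- B builds each row directly with a per-cell conditional (1 on column num-1-r, 2 on column num-r for r>=1)
-- instead of zeroing an n×n matrix and then patching two anti-diagonals in place; objective: simpler.


-- ===== PORT A =====
-- 'array[i][-i-1] = 1' reads row i and sets its (possibly negative) index; both indices are always
-- in range here (0 ≤ i < num, 1 ≤ i+1 ≤ num, 1 ≤ j ≤ num), so the total forms pyGetD/pySetD are exact.
def matrix_generator (num : Int) : List (List Int) :=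
  let array := (PySem.List.pyRange 0 num).map
    (fun _ => (PySem.List.pyRange 0 num).map (fun step => step * 0))
  let array := (PySem.List.pyRange 0 num).foldl
    (fun a i => PySem.List.pySetD a i (PySem.List.pySetD (PySem.List.pyGetD a i []) (-i - 1) 1)) array
  let array := (PySem.List.pyRange 1 num).foldl
    (fun a j => PySem.List.pySetD a j (PySem.List.pySetD (PySem.List.pyGetD a j []) (-j) 2)) array
  array

-- ===== PORT B =====
def matrix_generator_alt (num : Int) : List (List Int) :=
  (PySem.List.pyRange 0 num).map (fun r =>
    (PySem.List.pyRange 0 num).map (fun c =>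
      if c = num - 1 - r then 1 else if 1 ≤ r ∧ c = num - r then 2 else 0))

-- ===== PRECONDITION & SPEC =====
def Spec_matrix_generator (num : Int) (out : List (List Int)) : Prop := out = matrix_generator_alt num
instance (num : Int) (out : List (List Int)) : Decidable (Spec_matrix_generator num out) := by unfold Spec_matrix_generator; infer_instance

-- ===== CLAIM (what is proved, stated in full; the proofs are below) =====
def Claim_equal_matrix_generator : Prop := ∀ (num : Int), Dom_matrix_generator num → Spec_matrix_generator num (matrix_generator num)

-- ===== LEMMAS AND PROOFS =====

lemma pyRange_nil (a b : Int) (h : b ≤ a) : PySem.List.pyRange a b = [] := by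
  rcases hx : PySem.List.pyRange a b with _ | ⟨x, t⟩
  · rfl
  · exfalso
    have hm : x ∈ PySem.List.pyRange a b := by rw [hx]; exact List.mem_cons_self
    rw [PySem.List.mem_pyRange_one] at hm; omega

lemma pySetD_neg {α : Type} (xs : List α) (k : Nat) (v : α) (h0 : 0 < k) (h1 : k ≤ xs.length) :
    PySem.List.pySetD xs (-(k : Int)) v = xs.set (xs.length - k) v := by
  have hne : ¬ (0:Int) ≤ -(k:Int) := by omega
  have hle : -(xs.length:Int) ≤ -(k:Int) := by omega
  simp only [PySem.List.pySetD, PySem.List.pySet?, PySem.List.pyIdx?, if_neg hne, if_pos hle,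
    Option.map_some, Option.getD_some, neg_neg, Int.toNat_natCast]

lemma pyRange_zero_nodup (b : Int) : (PySem.List.pyRange 0 b).Nodup := by
  rcases (by omega : b ≤ 0 ∨ 0 < b) with h | h
  · rw [pyRange_nil 0 b h]; exact List.nodup_nil
  · have hb : b = ((b.toNat : Nat) : Int) := by omega
    rw [hb, PySem.List.pyRange_zero_natCast]
    exact (List.nodup_range).map (fun x y => by omega)

lemma pyRange_one_nodup (b : Int) : (PySem.List.pyRange 1 b).Nodup := by
  rcases (by omega : b ≤ 1 ∨ 1 < b) with h | h
  · rw [pyRange_nil 1 b h]; exact List.nodup_nil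
  · have hc := PySem.List.pyRange_one_cons (a := 0) (b := b) (by omega)
    have := pyRange_zero_nodup b
    rw [hc] at this
    exact this.of_cons

lemma foldl_pySetD_rows (g : Int → List Int → List Int) (L : List Int) :
    ∀ (arr : List (List Int)),
      (∀ i ∈ L, 0 ≤ i ∧ i < (arr.length : Int)) → L.Nodup →
      L.foldl (fun a i => PySem.List.pySetD a i (g i (PySem.List.pyGetD a i []))) arr
        = arr.mapIdx (fun r row => if (r : Int) ∈ L then g (r : Int) row else row) := by
  induction L with
  | nil =>
    intro arr _ _
    simp only [List.foldl_nil, List.not_mem_nil, if_false]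
    apply List.ext_getElem <;> simp
  | cons i t ih =>
    intro arr hb hnd
    have h0 : 0 ≤ i := (hb i (by simp)).1
    have h1 : i < (arr.length : Int) := (hb i (by simp)).2
    have hi : i.toNat < arr.length := by omega
    have hget : PySem.List.pyGetD arr i [] = arr[i.toNat] :=
      PySem.List.pyGetD_eq_getElem arr [] h0 h1
    have hit : i ∉ t := (List.nodup_cons.mp hnd).1
    simp only [List.foldl_cons, hget, PySem.List.pySetD_of_nonneg _ _ h0]
    rw [ih _ (by intro x hx; have := hb x (List.mem_cons_of_mem _ hx); simpa using this) hnd.of_cons]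
    apply List.ext_getElem
    · simp
    · intro c hc1 hc2
      simp only [List.getElem_mapIdx, List.getElem_set, List.mem_cons]
      by_cases hci : (c : Int) = i
      · have hcn : i.toNat = c := by omega
        simp [hcn, hci, hit]
      · have hcn : ¬ i.toNat = c := by omega
        by_cases hct : (c : Int) ∈ t <;> simp [hcn, hci, hct]

theorem matrix_generator_eq_alt (num : Int) : matrix_generator num = matrix_generator_alt num := by
  rcases (by omega : num ≤ 0 ∨ 0 < num) with hle | hpos
  · simp [matrix_generator, matrix_generator_alt, pyRange_nil 0 num hle, pyRange_nil 1 num (by omega)]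
  · obtain ⟨n, rfl⟩ : ∃ n : Nat, num = (n : Int) := ⟨num.toNat, by omega⟩
    have hn : 0 < n := by exact_mod_cast hpos
    unfold matrix_generator matrix_generator_alt
    simp only []
    set zrow : List Int := (PySem.List.pyRange 0 (n:Int)).map (fun step => step * 0) with hzrow
    set base : List (List Int) := (PySem.List.pyRange 0 (n:Int)).map (fun _ => zrow) with hbase
    have hzlen : zrow.length = n := by simp [hzrow, PySem.List.pyRange_zero_natCast]
    have hblen : base.length = n := by simp [hbase, PySem.List.pyRange_zero_natCast]
    rw [foldl_pySetD_rows (fun i row => PySem.List.pySetD row (-i - 1) 1) _ base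
        (by intro x hx; rw [PySem.List.mem_pyRange_one] at hx; rw [hblen]; exact hx)
        (pyRange_zero_nodup _)]
    rw [foldl_pySetD_rows (fun j row => PySem.List.pySetD row (-j) 2) _ _
        (by intro x hx; rw [PySem.List.mem_pyRange_one] at hx
            rw [List.length_mapIdx, hblen]; omega)
        (pyRange_one_nodup _)]
    apply List.ext_getElem
    · simp [PySem.List.pyRange_zero_natCast, hblen]
    · intro r hr1 hr2
      have hrn : r < n := by simpa [PySem.List.pyRange_zero_natCast] using hr2
      simp only [List.getElem_mapIdx, List.getElem_map, hbase]
      have hm0 : ((r:Int) ∈ PySem.List.pyRange 0 (n:Int)) := by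
        rw [PySem.List.mem_pyRange_one]; omega
      rw [if_pos hm0]
      have hs1 : PySem.List.pySetD zrow (-(r:Int) - 1) 1 = zrow.set (n - (r+1)) 1 := by
        have : (-(r:Int) - 1) = -(((r+1 : Nat)):Int) := by push_cast; ring
        rw [this, pySetD_neg zrow (r+1) 1 (by omega) (by omega), hzlen]
      rw [hs1]
      by_cases h1 : 1 ≤ r
      · have hm1 : ((r:Int) ∈ PySem.List.pyRange 1 (n:Int)) := by
          rw [PySem.List.mem_pyRange_one]; omega
        rw [if_pos hm1]
        have hs2 : PySem.List.pySetD (zrow.set (n - (r+1)) 1) (-(r:Int)) 2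
            = (zrow.set (n - (r+1)) 1).set (n - r) 2 := by
          rw [pySetD_neg _ r 2 (by omega) (by simp [hzlen]; omega)]
          simp [hzlen]
        rw [hs2]
        apply List.ext_getElem
        · simp [hzlen, PySem.List.pyRange_zero_natCast]
        · intro c hc1 hc2
          have hcn : c < n := by simpa [hzlen] using hc1
          simp only [List.getElem_set, hzrow, PySem.List.pyRange_zero_natCast,
            List.getElem_map, List.getElem_range]
          split_ifs <;> push_cast at * <;> omega
      · have hm1 : ¬ ((r:Int) ∈ PySem.List.pyRange 1 (n:Int)) := by
          rw [PySem.List.mem_pyRange_one]; omega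
        rw [if_neg hm1]
        apply List.ext_getElem
        · simp [hzlen, PySem.List.pyRange_zero_natCast]
        · intro c hc1 hc2
          have hcn : c < n := by simpa [hzlen] using hc1
          simp only [List.getElem_set, hzrow, PySem.List.pyRange_zero_natCast,
            List.getElem_map, List.getElem_range]
          split_ifs <;> push_cast at * <;> omega

-- ===== VERDICT (by name: the statement is the Claim_ definition above) =====
theorem matrix_generator_spec : Claim_equal_matrix_generator := by
  intro num _
  exact matrix_generator_eq_alt num
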